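-- pv_equiv track=rewrite | github.com/oborchers/tablestakes | src/tablestakes/converter.py | _remap_header_attrs
-- ===== SOURCE A (Python) =====
-- def _remap_header_attrs(
--     old_attrs: dict[int, dict[str, str]],
--     old_headers: list[str],
--     new_headers: list[str],
-- ) -> dict[int, dict[str, str]]:
--     """Remap positional header attributes based on column name matching.
--
--     Maps old positional attributes to new positions by matching column names.
--     Columns that don't appear in the new headers lose their attributes.
--     New columns not in the old headers get no attributes.
--     """
--     # Build name → attrs mapping from old positions
--     name_to_attrs: dict[str, dict[str, str]] = {}
--     for old_idx, attrs in old_attrs.items():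
--         if old_idx < len(old_headers):
--             name = old_headers[old_idx]
--             # First occurrence wins for duplicate names
--             if name not in name_to_attrs:
--                 name_to_attrs[name] = attrs
--
--     # Map to new positions by name
--     new_attrs: dict[int, dict[str, str]] = {}
--     used_names: set[str] = set()
--     for new_idx, name in enumerate(new_headers):
--         if name in name_to_attrs and name not in used_names:
--             new_attrs[new_idx] = name_to_attrs[name]
--             used_names.add(name)
--
--     return new_attrs
-- ===== SOURCE B (Python) =====
-- def _remap_header_attrs(
--     old_attrs: dict[int, dict[str, str]],
--     old_headers: list[str],
--     new_headers: list[str],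
-- ) -> dict[int, dict[str, str]]:
--     """Remap positional header attributes by column-name matching.
--
--     Drives the rebuild from the old attributes: index the new headers once
--     (first occurrence of each name wins), look each old column name up in
--     that index, and sort the relocated entries by their new position.
--     """
--     first_new_idx: dict[str, int] = {}
--     for i, name in enumerate(new_headers):
--         first_new_idx.setdefault(name, i)
--
--     name_to_attrs: dict[str, dict[str, str]] = {}
--     for old_idx, attrs in old_attrs.items():
--         if old_idx < len(old_headers):
--             name_to_attrs.setdefault(old_headers[old_idx], attrs)
--
--     pairs = (
--         (first_new_idx[name], attrs)
--         for name, attrs in name_to_attrs.items()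
--         if name in first_new_idx
--     )
--     return dict(sorted(pairs, key=lambda p: p[0]))
-- ===== Notes on version B (the rewrite author's own statement) =====
-- stated objective: alternative
-- what changed: B drives the rebuild from the old attributes instead of scanning new_headers with a used-names set: it indexes new_headers once into a first-occurrence dict, maps each surviving old name through that index, and sorts the relocated entries by new position.
import Mathlib
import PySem

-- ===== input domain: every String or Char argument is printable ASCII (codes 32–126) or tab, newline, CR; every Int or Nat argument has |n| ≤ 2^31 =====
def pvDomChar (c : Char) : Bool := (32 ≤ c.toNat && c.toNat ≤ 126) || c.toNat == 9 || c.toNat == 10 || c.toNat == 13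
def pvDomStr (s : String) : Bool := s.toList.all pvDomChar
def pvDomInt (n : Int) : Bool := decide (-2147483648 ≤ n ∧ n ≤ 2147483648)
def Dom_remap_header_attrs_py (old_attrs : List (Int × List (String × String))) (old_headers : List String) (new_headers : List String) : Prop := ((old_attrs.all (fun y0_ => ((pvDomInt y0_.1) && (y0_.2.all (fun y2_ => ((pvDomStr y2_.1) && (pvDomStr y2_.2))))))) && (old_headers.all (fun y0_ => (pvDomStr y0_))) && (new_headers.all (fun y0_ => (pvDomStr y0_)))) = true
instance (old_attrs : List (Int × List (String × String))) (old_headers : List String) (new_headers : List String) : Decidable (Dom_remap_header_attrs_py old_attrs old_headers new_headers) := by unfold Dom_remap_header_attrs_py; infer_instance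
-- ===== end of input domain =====

-- B is an alternative decomposition: it indexes new_headers once (first occurrence of each
-- name wins), maps each surviving old column name through that index, and sorts the
-- relocated entries by new position — no used-names set, no driving scan of new_headers.

-- ===== PORT A =====
-- old_attrs encodes a Python dict: only a key's FIRST binding is an item of the dict,
-- so the items() loop carries a seen-keys set that skips later bindings of the same key.
def pvA_step1 (old_headers : List String)
    (st : PySem.Set Int × PySem.Dict String (List (String × String)))
    (p : Int × List (String × String)) :
    PySem.Set Int × PySem.Dict String (List (String × String)) :=
  if st.1.contains p.1 then st
  else
    (st.1.add p.1,
      if p.1 < (old_headers.length : Int) then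
        match PySem.List.pyGet? old_headers p.1 with
        | some name => if st.2.contains name then st.2 else st.2.insert name p.2
        | none => st.2      -- old_headers[old_idx] raises IndexError in Python; excluded by Pre_
      else st.2)

def pvA_step2 (nta : PySem.Dict String (List (String × String)))
    (st : PySem.Dict Int (List (String × String)) × PySem.Set String)
    (p : Int × String) :
    PySem.Dict Int (List (String × String)) × PySem.Set String :=
  if nta.contains p.2 && !(st.2.contains p.2) then
    (st.1.insert p.1 (nta.getD p.2 []), st.2.add p.2)
  else st

def remap_header_attrs_py (old_attrs : List (Int × List (String × String))) (old_headers : List String) (new_headers : List String) : List (Int × List (String × String)) :=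
  let nta := (old_attrs.foldl (pvA_step1 old_headers)
    ((PySem.Set.empty : PySem.Set Int), (PySem.Dict.empty : PySem.Dict String (List (String × String))))).2
  ((PySem.List.enumerate new_headers 0).foldl (pvA_step2 nta)
    ((PySem.Dict.empty : PySem.Dict Int (List (String × String))), (PySem.Set.empty : PySem.Set String))).1.items

-- ===== PORT B =====
def pvB_step1 (old_headers : List String)
    (d : PySem.Dict String (List (String × String)))
    (p : Int × List (String × String)) : PySem.Dict String (List (String × String)) :=
  if p.1 < (old_headers.length : Int) then
    match PySem.List.pyGet? old_headers p.1 with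
    | some name => d.setdefault name p.2
    | none => d      -- old_headers[old_idx] raises IndexError in Python; excluded by Pre_
  else d

def remap_header_attrs_py_alt (old_attrs : List (Int × List (String × String))) (old_headers : List String) (new_headers : List String) : List (Int × List (String × String)) :=
  let fni : PySem.Dict String Int :=
    (PySem.List.enumerate new_headers 0).foldl (fun d p => d.setdefault p.2 p.1) PySem.Dict.empty
  let nta := old_attrs.foldl (pvB_step1 old_headers)
    (PySem.Dict.empty : PySem.Dict String (List (String × String)))
  let pairs := nta.items.filterMap (fun q => (fni.get? q.1).map (fun i => (i, q.2)))
  PySem.List.sorted pairs (fun p => p.1)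

-- ===== PRECONDITION & SPEC =====
-- Pre_ excludes exactly the inputs on which Python A raises IndexError:
-- a key old_idx with old_idx < len(old_headers) but old_idx < -len(old_headers).
def Pre_remap_header_attrs_py (old_attrs : List (Int × List (String × String))) (old_headers : List String) (new_headers : List String) : Prop :=
  ∀ p ∈ old_attrs, p.1 < (old_headers.length : Int) → -(old_headers.length : Int) ≤ p.1
instance (old_attrs : List (Int × List (String × String))) (old_headers : List String) (new_headers : List String) : Decidable (Pre_remap_header_attrs_py old_attrs old_headers new_headers) := by unfold Pre_remap_header_attrs_py; infer_instance

def pvWitness_remap_header_attrs_py : (List (Int × List (String × String))) × List String × List String :=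
  ([((0 : Int), [("align", "left")])], (["h"], ["x", "h"]))

def Spec_remap_header_attrs_py (old_attrs : List (Int × List (String × String))) (old_headers : List String) (new_headers : List String) (out : List (Int × List (String × String))) : Prop := out = remap_header_attrs_py_alt old_attrs old_headers new_headers
instance (old_attrs : List (Int × List (String × String))) (old_headers : List String) (new_headers : List String) (out : List (Int × List (String × String))) : Decidable (Spec_remap_header_attrs_py old_attrs old_headers new_headers out) := by unfold Spec_remap_header_attrs_py; infer_instance

-- ===== CLAIM (what is proved, stated in full; the proofs are below) =====
def Claim_equal_remap_header_attrs_py : Prop := ∀ (old_attrs : List (Int × List (String × String))) (old_headers : List String) (new_headers : List String), Dom_remap_header_attrs_py old_attrs old_headers new_headers → Pre_remap_header_attrs_py old_attrs old_headers new_headers → Spec_remap_header_attrs_py old_attrs old_headers new_headers (remap_header_attrs_py old_attrs old_headers new_headers)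

-- ===== LEMMAS AND PROOFS =====

-- a successful positional lookup implies the index is below the length
lemma pv_pyGet?_some_lt {α : Type} {xs : List α} {i : Int} {a : α}
    (h : PySem.List.pyGet? xs i = some a) : i < (xs.length : Int) := by
  by_contra hn
  have : PySem.List.pyGet? xs i = none := by
    simp only [PySem.List.pyGet?, PySem.List.pyIdx?]
    split_ifs with h1 h2 <;> simp_all <;> omega
  simp [this] at h

lemma pv_set_contains_add {α : Type} [BEq α] [LawfulBEq α] (s : PySem.Set α) (x y : α) :
    (PySem.Set.add s x).contains y = (s.contains y || y == x) := by
  simp only [PySem.Set.add, PySem.Set.contains]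
  split_ifs with h
  · by_cases hyx : y = x
    · subst hyx; simp_all
    · simp [hyx]
  · by_cases hyx : y = x <;> simp_all

lemma pv_dict_contains_mono {κ ν : Type} [BEq κ] [LawfulBEq κ]
    {d : PySem.Dict κ ν} {x : κ} (k : κ) (v : ν)
    (h : d.contains x = true) : (d.insert k v).contains x = true := by
  rw [PySem.Dict.contains_insert]; simp [h]

-- the two name_to_attrs loops build the same dict
lemma pv_nta_eq (old_headers : List String) :
    ∀ (l : List (Int × List (String × String))) (s : PySem.Set Int)
      (d : PySem.Dict String (List (String × String))),
      (∀ k nm, s.contains k = true → PySem.List.pyGet? old_headers k = some nm →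
        d.contains nm = true) →
      (l.foldl (pvA_step1 old_headers) (s, d)).2 = l.foldl (pvB_step1 old_headers) d := by
  intro l
  induction l with
  | nil => intro s d _; rfl
  | cons p t ih =>
    intro s d hinv
    by_cases hs : s.contains p.1 = true
    · have hb : pvB_step1 old_headers d p = d := by
        unfold pvB_step1
        split_ifs with hlt
        · cases hget : PySem.List.pyGet? old_headers p.1 with
          | none => rfl
          | some nm => exact PySem.Dict.setdefault_of_contains d p.2 (hinv _ _ hs hget)
        · rfl
      simp only [List.foldl_cons, pvA_step1, hs, if_true, hb]
      exact ih s d hinv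
    · have hs' : s.contains p.1 = false := by simpa using hs
      -- the dict component both steps produce
      have hstep : (pvA_step1 old_headers (s, d) p) =
          (s.add p.1, pvB_step1 old_headers d p) := by
        unfold pvA_step1 pvB_step1
        simp only [hs', Bool.false_eq_true, if_false]
        congr 1
        split_ifs with hlt
        · cases hget : PySem.List.pyGet? old_headers p.1 with
          | none => rfl
          | some nm =>
            dsimp only
            by_cases hc : d.contains nm = true
            · rw [PySem.Dict.setdefault_of_contains d p.2 hc]; simp [hc]
            · rw [PySem.Dict.setdefault_of_not_contains d p.2 (by simpa using hc)]
              simp [hc]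
        · rfl
      simp only [List.foldl_cons, hstep]
      apply ih
      intro k nm hk hget
      rw [pv_set_contains_add] at hk
      rcases Bool.or_eq_true_iff.mp hk with hk1 | hk2
      · -- k was already seen: monotonicity of contains
        have hd := hinv _ _ hk1 hget
        unfold pvB_step1
        split_ifs with hlt
        · cases hget2 : PySem.List.pyGet? old_headers p.1 with
          | none => exact hd
          | some nm2 =>
            dsimp only
            by_cases hc : d.contains nm2 = true
            · rwa [PySem.Dict.setdefault_of_contains d p.2 hc]
            · rw [PySem.Dict.setdefault_of_not_contains d p.2 (by simpa using hc)]
              exact pv_dict_contains_mono _ _ hd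
        · exact hd
      · -- k = p.1: the name just got inserted (or was present)
        have hkp : k = p.1 := by simpa using hk2
        subst hkp
        have hlt := pv_pyGet?_some_lt hget
        unfold pvB_step1
        rw [if_pos hlt, hget]
        dsimp only
        rw [PySem.Dict.contains_setdefault]
        simp

-- first-index map: what the fni fold looks up
def pvFirstIdx (nm : String) (ps : List (Int × String)) : Option Int :=
  (ps.find? (fun p => p.2 == nm)).map (·.1)

lemma pv_fni_get? (nm : String) :
    ∀ (ps : List (Int × String)) (d : PySem.Dict String Int),
      (ps.foldl (fun d p => d.setdefault p.2 p.1) d).get? nm =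
        (match d.get? nm with
         | some v => some v
         | none => pvFirstIdx nm ps) := by
  intro ps
  induction ps with
  | nil => intro d; cases hd : d.get? nm <;> simp [pvFirstIdx, hd]
  | cons p t ih =>
    intro d
    rw [List.foldl_cons, ih]
    by_cases hnm : nm = p.2
    · subst hnm
      rw [PySem.Dict.get?_setdefault_self]
      cases hd : d.get? p.2 with
      | none => simp [pvFirstIdx, hd]
      | some v => simp [pvFirstIdx, hd]
    · rw [PySem.Dict.get?_setdefault_of_ne _ _ hnm]
      cases hd : d.get? nm with
      | none =>
        have : (p.2 == nm) = false := by simpa using fun h => hnm h.symm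
        simp [pvFirstIdx, List.find?_cons, this]
      | some v => simp

-- the list of entries A's second loop emits
def pvEmit (nta : PySem.Dict String (List (String × String))) :
    List (Int × String) → PySem.Set String → List (Int × List (String × String))
  | [], _ => []
  | p :: t, u =>
    if nta.contains p.2 && !(u.contains p.2) then
      (p.1, nta.getD p.2 []) :: pvEmit nta t (u.add p.2)
    else pvEmit nta t u

lemma pv_loop2_items (nta : PySem.Dict String (List (String × String))) :
    ∀ (ps : List (Int × String)) (d : PySem.Dict Int (List (String × String)))
      (u : PySem.Set String),
      (∀ p ∈ ps, d.contains p.1 = false) → ps.Pairwise (fun a b => a.1 < b.1) →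
      ((ps.foldl (pvA_step2 nta) (d, u)).1).items = d.items ++ pvEmit nta ps u := by
  intro ps
  induction ps with
  | nil => intro d u _ _; simp [pvEmit]
  | cons p t ih =>
    intro d u hfresh hpw
    rw [List.foldl_cons]
    by_cases hc : (nta.contains p.2 && !(u.contains p.2)) = true
    · have hstep : pvA_step2 nta (d, u) p =
          (d.insert p.1 (nta.getD p.2 []), u.add p.2) := by
        unfold pvA_step2; rw [if_pos hc]
      have hfresh' : ∀ q ∈ t, (d.insert p.1 (nta.getD p.2 [])).contains q.1 = false := by
        intro q hq
        rw [PySem.Dict.contains_insert]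
        have hne : q.1 ≠ p.1 := by
          have := (List.pairwise_cons.mp hpw).1 q hq
          omega
        simp [hne, hfresh q (List.mem_cons_of_mem _ hq)]
      rw [hstep, ih _ _ hfresh' (List.pairwise_cons.mp hpw).2,
        PySem.Dict.items_insert_of_not_contains _ _ (hfresh p (List.mem_cons_self ..))]
      have hemit : pvEmit nta (p :: t) u =
          (p.1, nta.getD p.2 []) :: pvEmit nta t (u.add p.2) := by
        rw [show pvEmit nta (p :: t) u = if nta.contains p.2 && !(u.contains p.2) then
            (p.1, nta.getD p.2 []) :: pvEmit nta t (u.add p.2) else pvEmit nta t u from rfl,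
          if_pos hc]
      rw [hemit]; simp
    · have hstep : pvA_step2 nta (d, u) p = (d, u) := by
        unfold pvA_step2; rw [if_neg hc]
      have hemit : pvEmit nta (p :: t) u = pvEmit nta t u := by
        rw [show pvEmit nta (p :: t) u = if nta.contains p.2 && !(u.contains p.2) then
            (p.1, nta.getD p.2 []) :: pvEmit nta t (u.add p.2) else pvEmit nta t u from rfl,
          if_neg hc]
      rw [hstep, ih _ _ (fun q hq => hfresh q (List.mem_cons_of_mem _ hq))
        (List.pairwise_cons.mp hpw).2, hemit]

lemma pv_emit_sublist (nta : PySem.Dict String (List (String × String))) :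
    ∀ (ps : List (Int × String)) (u : PySem.Set String),
      List.Sublist (pvEmit nta ps u) (ps.map (fun p => (p.1, nta.getD p.2 []))) := by
  intro ps
  induction ps with
  | nil => intro u; simp [pvEmit]
  | cons p t ih =>
    intro u
    rw [List.map_cons]
    unfold pvEmit
    split_ifs with hc
    · exact List.Sublist.cons₂ _ (ih _)
    · exact List.Sublist.cons _ (ih _)

lemma pv_firstIdx_cons_ne {nm : String} {p : Int × String} {t : List (Int × String)}
    (hne : nm ≠ p.2) : pvFirstIdx nm (p :: t) = pvFirstIdx nm t := by
  have : (p.2 == nm) = false := by simpa using fun h => hne h.symm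
  simp [pvFirstIdx, List.find?_cons, this]

lemma pv_firstIdx_cons_self {p : Int × String} {t : List (Int × String)} :
    pvFirstIdx p.2 (p :: t) = some p.1 := by
  simp [pvFirstIdx, List.find?_cons]

lemma pv_emit_mem (nta : PySem.Dict String (List (String × String))) :
    ∀ (ps : List (Int × String)) (u : PySem.Set String) (i : Int)
      (a : List (String × String)),
      (i, a) ∈ pvEmit nta ps u ↔
        ∃ nm, nta.contains nm = true ∧ u.contains nm = false ∧
          pvFirstIdx nm ps = some i ∧ a = nta.getD nm [] := by
  intro ps
  induction ps with
  | nil => intro u i a; simp [pvEmit, pvFirstIdx]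
  | cons p t ih =>
    intro u i a
    unfold pvEmit
    split_ifs with hc
    · obtain ⟨hcn, hcu⟩ := Bool.and_eq_true_iff.mp hc
      have hcu' : u.contains p.2 = false := by simpa using hcu
      rw [List.mem_cons, ih]
      constructor
      · rintro (heq | ⟨nm, h1, h2, h3, h4⟩)
        · have hi : i = p.1 := congrArg Prod.fst heq
          refine ⟨p.2, hcn, hcu', ?_, congrArg Prod.snd heq⟩
          rw [pv_firstIdx_cons_self, hi]
        · rw [pv_set_contains_add] at h2
          obtain ⟨h2u, h2p⟩ := Bool.or_eq_false_iff.mp h2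
          have hne : nm ≠ p.2 := by simpa using h2p
          exact ⟨nm, h1, h2u, by rwa [pv_firstIdx_cons_ne hne], h4⟩
      · rintro ⟨nm, h1, h2, h3, h4⟩
        by_cases hnm : nm = p.2
        · subst hnm
          left
          rw [pv_firstIdx_cons_self] at h3
          have hi : p.1 = i := by injection h3
          rw [h4, hi]
        · right
          refine ⟨nm, h1, ?_, by rwa [pv_firstIdx_cons_ne hnm] at h3, h4⟩
          rw [pv_set_contains_add]
          have : (nm == p.2) = false := by simpa using hnm
          rw [this, h2]
          rfl
    · have hind : ∀ nm, nta.contains nm = true → u.contains nm = false → nm ≠ p.2 := by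
        intro nm h1 h2 hnp
        subst hnp
        apply hc
        rw [h1, h2]
        rfl
      rw [ih]
      constructor
      · rintro ⟨nm, h1, h2, h3, h4⟩
        exact ⟨nm, h1, h2, by rwa [pv_firstIdx_cons_ne (hind nm h1 h2)], h4⟩
      · rintro ⟨nm, h1, h2, h3, h4⟩
        exact ⟨nm, h1, h2, by rwa [pv_firstIdx_cons_ne (hind nm h1 h2)] at h3, h4⟩

lemma pv_ntaB_nodup (old_headers : List String) :
    ∀ (l : List (Int × List (String × String)))
      (d : PySem.Dict String (List (String × String))),
      d.keys.Nodup → (l.foldl (pvB_step1 old_headers) d).keys.Nodup := by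
  intro l
  induction l with
  | nil => intro d h; exact h
  | cons p t ih =>
    intro d h
    rw [List.foldl_cons]
    apply ih
    unfold pvB_step1
    split_ifs with hlt
    · cases hget : PySem.List.pyGet? old_headers p.1 with
      | none => exact h
      | some nm =>
        dsimp only
        by_cases hc : d.contains nm = true
        · rwa [PySem.Dict.setdefault_of_contains d p.2 hc]
        · rw [PySem.Dict.setdefault_of_not_contains d p.2 (by simpa using hc)]
          exact PySem.Dict.nodup_keys_insert d nm p.2 h
    · exact h

lemma pv_fni_eq_firstIdx (new_headers : List String) (nm : String) :
    ((PySem.List.enumerate new_headers 0).foldl (fun d p => d.setdefault p.2 p.1)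
      (PySem.Dict.empty : PySem.Dict String Int)).get? nm =
      pvFirstIdx nm (PySem.List.enumerate new_headers 0) := by
  rw [pv_fni_get?, PySem.Dict.get?_empty]

lemma pv_firstIdx_mem {nm : String} {ps : List (Int × String)} {i : Int}
    (h : pvFirstIdx nm ps = some i) : (i, nm) ∈ ps := by
  unfold pvFirstIdx at h
  cases hf : ps.find? (fun p => p.2 == nm) with
  | none => rw [hf] at h; simp at h
  | some q =>
    rw [hf] at h
    have hq := List.mem_of_find?_eq_some hf
    have hqs : q.2 = nm := by simpa using List.find?_some hf
    have hqi : q.1 = i := by simpa using h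
    have hqe : q = (i, nm) := by cases q; simp_all
    rwa [hqe] at hq

lemma pv_firstIdx_enum_inj {new_headers : List String} {nm nm' : String} {i : Int}
    (h : pvFirstIdx nm (PySem.List.enumerate new_headers 0) = some i)
    (h' : pvFirstIdx nm' (PySem.List.enumerate new_headers 0) = some i) : nm = nm' := by
  obtain ⟨k, hk, hkp⟩ := (PySem.List.mem_enumerate_iff _ _ _).mp (pv_firstIdx_mem h)
  obtain ⟨k', hk', hkp'⟩ := (PySem.List.mem_enumerate_iff _ _ _).mp (pv_firstIdx_mem h')
  have hik : i = (k : Int) := by simpa using congrArg Prod.fst hkp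
  have hik' : i = (k' : Int) := by simpa using congrArg Prod.fst hkp'
  have hkk : k = k' := by omega
  have h2 : nm = new_headers[k] := by simpa using congrArg Prod.snd hkp
  have h2' : nm' = new_headers[k'] := by simpa using congrArg Prod.snd hkp'
  subst hkk
  rw [h2, h2']

-- ===== VERDICT (by name: the statement is the Claim_ definition above) =====
theorem remap_header_attrs_py_spec : Claim_equal_remap_header_attrs_py := by
  intro oa oh nh _dom _pre
  unfold Spec_remap_header_attrs_py remap_header_attrs_py remap_header_attrs_py_alt
  dsimp only
  have hnta : (oa.foldl (pvA_step1 oh)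
      ((PySem.Set.empty : PySem.Set Int),
       (PySem.Dict.empty : PySem.Dict String (List (String × String))))).2
      = oa.foldl (pvB_step1 oh)
        (PySem.Dict.empty : PySem.Dict String (List (String × String))) := by
    apply pv_nta_eq
    intro k nm hk _
    simp [PySem.Set.empty, PySem.Set.contains] at hk
  rw [hnta]
  have hkeys : (oa.foldl (pvB_step1 oh)
      (PySem.Dict.empty : PySem.Dict String (List (String × String)))).keys.Nodup :=
    pv_ntaB_nodup oh oa _ PySem.Dict.nodup_keys_empty
  rw [pv_loop2_items _ (PySem.List.enumerate nh 0) _ _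
    (fun p _ => PySem.Dict.contains_empty p.1) (PySem.List.pairwise_lt_enumerate nh 0),
    show (PySem.Dict.empty : PySem.Dict Int (List (String × String))).items = [] from rfl,
    List.nil_append]
  -- abbreviate both dictionaries
  generalize hN : oa.foldl (pvB_step1 oh)
    (PySem.Dict.empty : PySem.Dict String (List (String × String))) = nta at *
  have hpw : (pvEmit nta (PySem.List.enumerate nh 0) PySem.Set.empty).Pairwise
      (fun a b => a.1 < b.1) :=
    List.Pairwise.sublist (pv_emit_sublist nta (PySem.List.enumerate nh 0) PySem.Set.empty)
      (List.pairwise_map.mpr (PySem.List.pairwise_lt_enumerate nh 0))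
  have nodupE : (pvEmit nta (PySem.List.enumerate nh 0) PySem.Set.empty).Nodup :=
    hpw.imp (fun h heq => absurd (heq ▸ h) (lt_irrefl _))
  have hkeys2 : (nta.items.map (fun q => q.1)).Nodup := hkeys
  have hitemsNodup : nta.items.Nodup := List.Nodup.of_map _ hkeys2
  have nodupP : (nta.items.filterMap (fun q =>
      (((PySem.List.enumerate nh 0).foldl (fun d p => d.setdefault p.2 p.1)
        (PySem.Dict.empty : PySem.Dict String Int)).get? q.1).map
        (fun i => (i, q.2)))).Nodup := by
    apply List.Nodup.filterMap _ hitemsNodup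
    intro q q' b hb hb'
    obtain ⟨j, hj1, hj2⟩ := Option.map_eq_some_iff.mp hb
    obtain ⟨j', hj1', hj2'⟩ := Option.map_eq_some_iff.mp hb'
    rw [pv_fni_eq_firstIdx] at hj1 hj1'
    have hjj : j = j' := by
      have := congrArg Prod.fst (hj2.trans hj2'.symm); simpa using this
    subst hjj
    have h1 : q.1 = q'.1 := pv_firstIdx_enum_inj hj1 hj1'
    have h2 : q.2 = q'.2 := by
      have := congrArg Prod.snd (hj2.trans hj2'.symm); simpa using this
    cases q; cases q'; simp_all
  have hmem : ∀ x, x ∈ pvEmit nta (PySem.List.enumerate nh 0) PySem.Set.empty ↔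
      x ∈ nta.items.filterMap (fun q =>
        (((PySem.List.enumerate nh 0).foldl (fun d p => d.setdefault p.2 p.1)
          (PySem.Dict.empty : PySem.Dict String Int)).get? q.1).map
          (fun i => (i, q.2))) := by
    rintro ⟨i, a⟩
    rw [pv_emit_mem, List.mem_filterMap]
    constructor
    · rintro ⟨nm, h1, _, h3, h4⟩
      have hsome : (nta.get? nm).isSome := by
        rw [← PySem.Dict.contains_eq_isSome_get?]; exact h1
      obtain ⟨v, hv⟩ := Option.isSome_iff_exists.mp hsome
      have hav : a = v := by
        rw [h4, PySem.Dict.getD_eq_get?_getD, hv]; rfl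
      refine ⟨(nm, a), (PySem.Dict.get?_eq_some_iff_mem_items _ _ _ hkeys).mp
        (by rw [hv, hav]), ?_⟩
      rw [pv_fni_eq_firstIdx, h3]
      rfl
    · rintro ⟨q, hq, hfq⟩
      obtain ⟨j, hj1, hj2⟩ := Option.map_eq_some_iff.mp hfq
      have hji : j = i := congrArg Prod.fst hj2
      have hqa : q.2 = a := congrArg Prod.snd hj2
      have hget : nta.get? q.1 = some q.2 :=
        (PySem.Dict.get?_eq_some_iff_mem_items _ _ _ hkeys).mpr hq
      refine ⟨q.1, ?_, rfl, ?_, ?_⟩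
      · rw [PySem.Dict.contains_eq_isSome_get?, hget]; rfl
      · rw [← pv_fni_eq_firstIdx, hj1, hji]
      · rw [PySem.Dict.getD_eq_get?_getD, hget]; exact hqa.symm
  symm
  exact PySem.List.sorted_eq_of_perm_of_pairwise_lt _ _ _
    ((List.perm_ext_iff_of_nodup nodupE nodupP).mpr hmem) hpw
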